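-- pv_equiv track=rewrite | github.com/RISHIT7/Programming | COL/COL100/Lab_6/q5.py | get_valid_passwords
-- ===== SOURCE A (Python) =====
-- def get_valid_passwords(passwords):
--     ans = []
--     for password in passwords:
--         CHAR = False
--         LETTER = False
--         NUM = False
--         SIZE = False
--         if 6 <= len(password) <= 12:
--             SIZE = True
--         for char in password:
--             if char in ['#','$','@']:
--                 CHAR = True
--         for letter in password:
--             if letter in ['a', 'b', 'c', 'd', 'e', 'f', 'g', 'h', 'i', 'j', 'k', 'l', 'm', 'n', 'o', 'p', 'q', 'r', 's', 't', 'u', 'v', 'w', 'x', 'y', 'z']: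
--                 LETTER = True
--         for num in password:
--             if num in ['1', '2', '3', '4', '5', '6', '7', '8', '9', '0']:
--                 NUM = True
--         if CHAR and LETTER and NUM and SIZE:
--             ans.append(password)
--         else:
--             pass
--     return ans
-- ===== SOURCE B (Python) =====
-- SPECIALS = set('#$@')
-- LOWERS = set('abcdefghijklmnopqrstuvwxyz')
-- DIGITS = set('0123456789')
--
-- def _ok(password):
--     chars = set(password)
--     return (6 <= len(password) <= 12
--             and not chars.isdisjoint(SPECIALS)
--             and not chars.isdisjoint(LOWERS)
--             and not chars.isdisjoint(DIGITS))
--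
-- def get_valid_passwords(passwords):
--     return [p for p in passwords if _ok(p)]
-- ===== Notes on version B (the rewrite author's own statement) =====
-- stated objective: simpler
-- what changed: Replaces the four-flag accumulator with three full sequential character scans per password by a single filter with a per-password character set tested for disjointness against three fixed sets, with short-circuiting on the size check.
import Mathlib
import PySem

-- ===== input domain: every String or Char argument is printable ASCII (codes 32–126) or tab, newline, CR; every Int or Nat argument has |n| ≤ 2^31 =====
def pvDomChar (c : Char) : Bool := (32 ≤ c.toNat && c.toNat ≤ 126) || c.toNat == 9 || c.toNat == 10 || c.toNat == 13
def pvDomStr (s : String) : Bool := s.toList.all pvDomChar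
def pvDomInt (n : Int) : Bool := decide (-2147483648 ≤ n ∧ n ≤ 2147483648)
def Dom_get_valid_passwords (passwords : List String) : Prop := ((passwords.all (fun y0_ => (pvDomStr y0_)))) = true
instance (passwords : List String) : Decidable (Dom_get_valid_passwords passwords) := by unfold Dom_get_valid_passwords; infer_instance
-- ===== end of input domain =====

-- B replaces A's three per-password character scans with flag variables by a single List.filter over a per-password character set tested for disjointness against three fixed sets (objective: simpler).


-- ===== PORT A =====
def get_valid_passwords (passwords : List String) : List String :=
  passwords.foldl (fun ans password =>
    let SIZE := if 6 ≤ PySem.Str.len password ∧ PySem.Str.len password ≤ 12 then true else false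
    let CHAR := password.toList.foldl (fun b char => if char ∈ ['#','$','@'] then true else b) false
    let LETTER := password.toList.foldl (fun b letter => if letter ∈ ['a','b','c','d','e','f','g','h','i','j','k','l','m','n','o','p','q','r','s','t','u','v','w','x','y','z'] then true else b) false
    let NUM := password.toList.foldl (fun b num => if num ∈ ['1','2','3','4','5','6','7','8','9','0'] then true else b) false
    if CHAR && LETTER && NUM && SIZE then ans ++ [password] else ans) []

-- ===== PORT B =====
-- the three fixed character sets built once, as in Source B
def pvSpecials : PySem.Set Char := PySem.Set.ofList ['#','$','@']
def pvLowers : PySem.Set Char := PySem.Set.ofList ['a','b','c','d','e','f','g','h','i','j','k','l','m','n','o','p','q','r','s','t','u','v','w','x','y','z']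
def pvDigits : PySem.Set Char := PySem.Set.ofList ['1','2','3','4','5','6','7','8','9','0']

def pvOk (password : String) : Bool :=
  let chars := PySem.Set.ofList password.toList
  decide (6 ≤ PySem.Str.len password) && decide (PySem.Str.len password ≤ 12)
    && !(PySem.Set.isdisjoint chars pvSpecials)
    && !(PySem.Set.isdisjoint chars pvLowers)
    && !(PySem.Set.isdisjoint chars pvDigits)

def get_valid_passwords_alt (passwords : List String) : List String :=
  passwords.filter pvOk

-- ===== PRECONDITION & SPEC =====
def Spec_get_valid_passwords (passwords : List String) (out : List String) : Prop := out = get_valid_passwords_alt passwords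
instance (passwords : List String) (out : List String) : Decidable (Spec_get_valid_passwords passwords out) := by unfold Spec_get_valid_passwords; infer_instance

-- ===== CLAIM (what is proved, stated in full; the proofs are below) =====
def Claim_equal_get_valid_passwords : Prop := ∀ (passwords : List String), Dom_get_valid_passwords passwords → Spec_get_valid_passwords passwords (get_valid_passwords passwords)

-- ===== LEMMAS AND PROOFS =====

-- ===== VERDICT (by name: the statement is the Claim_ definition above) =====
-- the flag fold of A is an 'any'
theorem pvFlagFold (L : List Char) (xs : List Char) (b : Bool) :
    xs.foldl (fun b c => if c ∈ L then true else b) b = (b || xs.any (· ∈ L)) := by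
  induction xs generalizing b with
  | nil => simp
  | cons x xs ih =>
    simp only [List.foldl_cons, List.any_cons, ih]
    by_cases h : x ∈ L <;> simp [h]

-- 'any' over set(xs) equals 'any' over xs (membership is preserved by ofList)
theorem pvAnyOfList (xs : List Char) (p : Char → Bool) :
    (PySem.Set.ofList xs).any p = xs.any p := by
  rcases h : xs.any p with _ | _
  · simp only [List.any_eq_false] at h ⊢
    exact fun c hc => h c ((PySem.Set.mem_ofList xs c).mp hc)
  · simp only [List.any_eq_true] at h ⊢
    obtain ⟨c, hc, hp⟩ := h
    exact ⟨c, (PySem.Set.mem_ofList xs c).mpr hc, hp⟩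

theorem pvContainsIff (S : List Char) (c : Char) :
    (PySem.Set.ofList S).contains c = decide (c ∈ S) := by
  simp [List.contains_eq_mem, PySem.Set.mem_ofList]

-- each of A's three character scans computes B's ¬ isdisjoint test
theorem pvScanEqNotDisjoint (xs : List Char) (S : List Char) :
    xs.foldl (fun b c => if c ∈ S then true else b) false
      = !(PySem.Set.isdisjoint (PySem.Set.ofList xs) (PySem.Set.ofList S)) := by
  rw [pvFlagFold]
  simp only [Bool.false_or, PySem.Set.isdisjoint, Bool.not_not]
  rw [pvAnyOfList]
  simp only [pvContainsIff]

-- Bool shuffle: A orders the conjuncts CHAR,LETTER,NUM,SIZE; B tests size first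
theorem pvBoolShuffle (a b c : Bool) (P Q : Prop) [Decidable P] [Decidable Q] :
    (a && b && c && (if P ∧ Q then true else false)) = (decide P && decide Q && a && b && c) := by
  by_cases hP : P <;> by_cases hQ : Q <;> simp [hP, hQ]

-- A's per-password condition equals B's predicate pvOk
theorem pvCond (p : String) :
    (p.toList.foldl (fun b char => if char ∈ ['#','$','@'] then true else b) false
      && p.toList.foldl (fun b letter => if letter ∈ ['a','b','c','d','e','f','g','h','i','j','k','l','m','n','o','p','q','r','s','t','u','v','w','x','y','z'] then true else b) false
      && p.toList.foldl (fun b num => if num ∈ ['1','2','3','4','5','6','7','8','9','0'] then true else b) false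
      && (if 6 ≤ PySem.Str.len p ∧ PySem.Str.len p ≤ 12 then true else false)) = pvOk p := by
  rw [pvScanEqNotDisjoint p.toList ['#','$','@'],
      pvScanEqNotDisjoint p.toList ['a','b','c','d','e','f','g','h','i','j','k','l','m','n','o','p','q','r','s','t','u','v','w','x','y','z'],
      pvScanEqNotDisjoint p.toList ['1','2','3','4','5','6','7','8','9','0']]
  show _ = ((decide (6 ≤ PySem.Str.len p) && decide (PySem.Str.len p ≤ 12)) && _ && _ && _)
  exact pvBoolShuffle _ _ _ _ _

-- A's foldl with accumulator is acc ++ filter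
theorem pvFoldlA (ps : List String) (acc : List String) :
    ps.foldl (fun ans password =>
      let SIZE := if 6 ≤ PySem.Str.len password ∧ PySem.Str.len password ≤ 12 then true else false
      let CHAR := password.toList.foldl (fun b char => if char ∈ ['#','$','@'] then true else b) false
      let LETTER := password.toList.foldl (fun b letter => if letter ∈ ['a','b','c','d','e','f','g','h','i','j','k','l','m','n','o','p','q','r','s','t','u','v','w','x','y','z'] then true else b) false
      let NUM := password.toList.foldl (fun b num => if num ∈ ['1','2','3','4','5','6','7','8','9','0'] then true else b) false
      if CHAR && LETTER && NUM && SIZE then ans ++ [password] else ans) acc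
    = acc ++ ps.filter pvOk := by
  induction ps generalizing acc with
  | nil => simp
  | cons p ps ih =>
    rw [List.foldl_cons, ih, List.filter_cons]
    simp only [pvCond]
    cases h : pvOk p <;> simp

theorem get_valid_passwords_spec : Claim_equal_get_valid_passwords := by
  intro passwords _
  unfold Spec_get_valid_passwords get_valid_passwords get_valid_passwords_alt
  simpa using pvFoldlA passwords []
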